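-- pv_equiv track=rewrite | github.com/QQyukim/for-Algorithm-Zonzal | PS 스터디 (with @mindflip)/프로그래머스-카펫.py | solution
-- ===== SOURCE A (Python) =====
-- def solution(brown, yellow):
--     answer = []
--     # yw, yh
--     # yw * yh == yellow
--     # 정답: yw+2, yh+2
--
--     if yellow == 1:
--         answer = [3, 3]
--     else:
--         for yw in range(1, yellow // 2 + 1):
--             for yh in range(1, yellow // yw + 1):
--                 if yw * yh == yellow:
--                     aroundY = 4 + ((yw + yh) * 2)
--                     if aroundY == brown:
--                         answer = [yw + 2, yh + 2]
--                         answer = sorted(answer, reverse=True)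
--
--     return answer
-- ===== SOURCE B (Python) =====
-- def solution(brown, yellow):
--     # Solve yw+yh = (brown-4)/2, yw*yh = yellow as a quadratic: O(log) via integer sqrt.
--     if brown % 2:
--         return []
--     s = (brown - 4) // 2
--     d = s * s - 4 * yellow
--     if d < 0:
--         return []
--     # binary search the integer square root of d in [0, max(s,0)]
--     lo, hi = 0, s
--     while lo < hi:
--         mid = (lo + hi) // 2
--         if mid * mid < d:
--             lo = mid + 1
--         else:
--             hi = mid
--     r = lo
--     if r * r != d or (s - r) % 2:
--         return []
--     yh = (s - r) // 2
--     if yh < 1: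
--         return []
--     return [(s + r) // 2 + 2, yh + 2]
-- ===== Notes on version B (the rewrite author's own statement) =====
-- stated objective: faster
-- what changed: Replaces the O(yellow^2)-ish nested divisor scan with direct algebra: the pair (yw,yh) must solve yw+yh=(brown-4)/2 and yw*yh=yellow, so B checks parity, computes the discriminant and its integer square root by binary search, and reads off the unique root pair in O(log) time.
-- intended difference: When yellow == 1 and brown != 8, A unconditionally returns [3, 3] without ever checking brown, while B returns [] because no rectangle with 1 yellow cell has that brown border; B's answer is the intended one since A's special case simply forgot the brown test. — e.g. on solution(10, 1): A returns [3, 3], B returns []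
import Mathlib
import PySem

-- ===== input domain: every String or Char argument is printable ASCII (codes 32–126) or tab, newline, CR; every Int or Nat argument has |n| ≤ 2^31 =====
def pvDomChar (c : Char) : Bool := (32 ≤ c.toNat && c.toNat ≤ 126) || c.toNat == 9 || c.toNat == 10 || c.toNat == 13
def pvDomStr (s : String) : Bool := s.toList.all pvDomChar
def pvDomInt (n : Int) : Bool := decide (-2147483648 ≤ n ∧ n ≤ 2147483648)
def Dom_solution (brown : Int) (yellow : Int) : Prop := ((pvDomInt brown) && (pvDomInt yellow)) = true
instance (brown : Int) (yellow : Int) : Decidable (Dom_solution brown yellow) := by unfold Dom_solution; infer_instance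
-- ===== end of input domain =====

-- B replaces A's nested divisor scan by solving the sum/product quadratic with a binary-search
-- integer square root (faster, asymptotic); on yellow = 1 with brown ≠ 8, A returns [3, 3] without
-- checking brown — B returns [] there (intended fix, see D_solution).


-- ===== PORT A =====
def solution (brown : Int) (yellow : Int) : List Int :=
  let answer : List Int := []
  if yellow == 1 then
    [3, 3]
  else
    (PySem.List.pyRange 1 (PySem.Int.floordiv yellow 2 + 1) 1).foldl
      (fun answer yw =>
        (PySem.List.pyRange 1 (PySem.Int.floordiv yellow yw + 1) 1).foldl
          (fun answer yh =>
            if yw * yh == yellow then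
              let aroundY := 4 + (yw + yh) * 2
              if aroundY == brown then
                PySem.List.sorted [yw + 2, yh + 2] (fun x => x) true
              else answer
            else answer)
          answer)
      answer

-- ===== PORT B =====
-- the while-loop binary search of Source B, made structural with a fuel counter (= the loop bound hi-lo)
def bsearchFuel : Nat → Int → Int → Int → Int
  | 0, lo, _, _ => lo
  | fuel + 1, lo, hi, d =>
    if lo < hi then
      let mid := PySem.Int.floordiv (lo + hi) 2
      if mid * mid < d then bsearchFuel fuel (mid + 1) hi d
      else bsearchFuel fuel lo mid d
    else lo

def solution_alt (brown : Int) (yellow : Int) : List Int :=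
  if PySem.Int.mod brown 2 ≠ 0 then []
  else
    let s := PySem.Int.floordiv (brown - 4) 2
    let d := s * s - 4 * yellow
    if d < 0 then []
    else
      let r := bsearchFuel (s - 0).toNat 0 s d
      if r * r ≠ d ∨ PySem.Int.mod (s - r) 2 ≠ 0 then []
      else
        let yh := PySem.Int.floordiv (s - r) 2
        if yh < 1 then []
        else [PySem.Int.floordiv (s + r) 2 + 2, yh + 2]

-- ===== PRECONDITION & SPEC =====
-- On yellow = 1 with brown ≠ 8, A returns [3, 3] without checking brown; B returns [], the
-- intended value, since a 1×1 yellow rectangle needs exactly brown = 8 border cells.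
def D_solution (brown : Int) (yellow : Int) : Prop := yellow = 1 ∧ brown ≠ 8
instance (brown : Int) (yellow : Int) : Decidable (D_solution brown yellow) := by unfold D_solution; infer_instance

def Spec_solution (brown : Int) (yellow : Int) (out : List Int) : Prop :=
  ¬ D_solution brown yellow → out = solution_alt brown yellow
instance (brown : Int) (yellow : Int) (out : List Int) : Decidable (Spec_solution brown yellow out) := by unfold Spec_solution; infer_instance

def pvDiffWitness_solution : Int × Int := (10, 1)
def pvDiffWitnessOut_solution : (List Int) × (List Int) := ([3, 3], [])

-- ===== CLAIM (what is proved, stated in full; the proofs are below) =====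
def Claim_unchanged_solution : Prop := ∀ (brown : Int) (yellow : Int), Dom_solution brown yellow → Spec_solution brown yellow (solution brown yellow)
def Claim_changed_solution : Prop := Dom_solution (pvDiffWitness_solution.1) (pvDiffWitness_solution.2) ∧ D_solution (pvDiffWitness_solution.1) (pvDiffWitness_solution.2) ∧ solution (pvDiffWitness_solution.1) (pvDiffWitness_solution.2) = pvDiffWitnessOut_solution.1 ∧ solution_alt (pvDiffWitness_solution.1) (pvDiffWitness_solution.2) = pvDiffWitnessOut_solution.2 ∧ pvDiffWitnessOut_solution.1 ≠ pvDiffWitnessOut_solution.2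
def Claim_exact_solution : Prop := ∀ (brown : Int) (yellow : Int), Dom_solution brown yellow → D_solution brown yellow → solution brown yellow ≠ solution_alt brown yellow

-- ===== LEMMAS AND PROOFS =====

-- the unique (w, h) with w ≥ h ≥ 1, w*h = yellow and border 2*(w+h)+4 = brown
def good (brown yellow w h : Int) : Prop :=
  1 ≤ h ∧ h ≤ w ∧ w * h = yellow ∧ 2 * (w + h) + 4 = brown

theorem good_unique {brown yellow w1 h1 w2 h2 : Int}
    (g1 : good brown yellow w1 h1) (g2 : good brown yellow w2 h2) : w1 = w2 ∧ h1 = h2 := by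
  obtain ⟨a1, b1, c1, d1⟩ := g1
  obtain ⟨a2, b2, c2, d2⟩ := g2
  have hs : w1 + h1 = w2 + h2 := by omega
  have hp : w1 * h1 = w2 * h2 := by rw [c1, c2]
  have hz : (w1 - w2) * (w1 - h2) = 0 := by linear_combination w1 * hs - hp
  rcases mul_eq_zero.mp hz with h | h
  · constructor <;> omega
  · have hw1 : w1 = h2 := by omega
    constructor <;> omega

theorem good_one {brown w h : Int} (g : good brown 1 w h) : w = 1 ∧ h = 1 ∧ brown = 8 := by
  obtain ⟨a, b, c, d⟩ := g
  have hw : w = 1 := by nlinarith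
  have hh : h = 1 := by nlinarith
  omega

-- generic: a fold that overwrites the accumulator with a constant V whenever p holds
theorem foldl_write_const {β : Type} (p : β → Bool) (V : List Int) :
    ∀ (l : List β) (a : List Int),
      l.foldl (fun acc x => if p x then V else acc) a = if l.any p then V else a := by
  intro l
  induction l with
  | nil => intro a; simp
  | cons x t ih =>
    intro a
    simp only [List.foldl_cons, List.any_cons, ih]
    by_cases hx : p x = true <;> simp [hx]

theorem foldl_id {β : Type} (l : List β) (a : List Int) :
    l.foldl (fun acc (_ : β) => acc) a = a := by
  induction l <;> simp_all

theorem sorted_pair (a b : Int) :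
    PySem.List.sorted [a, b] (fun x => x) true = if b ≤ a then [a, b] else [b, a] := by
  by_cases h : b ≤ a
  · rw [if_pos h]
    exact PySem.List.sorted_rev_eq_self_of_pairwise _ _ (List.pairwise_pair.mpr h)
  · rw [if_neg h]
    exact PySem.List.sorted_rev_eq_of_perm_of_pairwise_gt _ _ _ (List.Perm.swap a b [])
      (List.pairwise_pair.mpr (by omega))

-- ---- characterization of A (for yellow ≠ 1) ----

theorem inner_body_eq {brown yellow w h : Int}
    (g : good brown yellow w h) (yw : Int) (h1yw : 1 ≤ yw) :
    ∀ (acc2 : List Int), ∀ yh ∈ PySem.List.pyRange 1 (PySem.Int.floordiv yellow yw + 1) 1,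
      (if yw * yh == yellow then
        (if 4 + (yw + yh) * 2 == brown then PySem.List.sorted [yw + 2, yh + 2] (fun x => x) true else acc2)
       else acc2)
      = if (yw * yh == yellow) && (4 + (yw + yh) * 2 == brown) then [w + 2, h + 2] else acc2 := by
  obtain ⟨hh1, hhw, hwh, hbr⟩ := g
  intro acc2 yh hyh
  have h1yh : 1 ≤ yh := (PySem.List.mem_pyRange_one.mp hyh).1
  by_cases c1 : (yw * yh == yellow) = true
  · by_cases c2 : (4 + (yw + yh) * 2 == brown) = true
    · have hprod : yw * yh = yellow := by simpa using c1
      have hsum : 4 + (yw + yh) * 2 = brown := by simpa using c2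
      simp only [c1, c2, Bool.and_self, if_true]
      rcases (by omega : yh ≤ yw ∨ yw < yh) with hc | hc
      · have hu := good_unique ⟨h1yh, hc, hprod, by omega⟩ ⟨hh1, hhw, hwh, hbr⟩
        rw [sorted_pair, if_pos (by omega), hu.1, hu.2]
      · have hu := good_unique ⟨h1yw, le_of_lt hc, by rw [mul_comm]; exact hprod, by omega⟩
          ⟨hh1, hhw, hwh, hbr⟩
        rw [sorted_pair, if_neg (by omega), hu.1, hu.2]
    · simp [c1, c2]
  · simp [c1]

theorem solution_eq_of_good {brown yellow w h : Int} (hy : yellow ≠ 1)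
    (g : good brown yellow w h) : solution brown yellow = [w + 2, h + 2] := by
  have hyfalse : (yellow == 1) = false := by simpa using hy
  obtain ⟨hh1, hhw, hwh, hbr⟩ := g
  have hw2 : 2 ≤ w := by
    by_contra hlt
    have hw1 : w = 1 := by omega
    have hh1' : h = 1 := by omega
    exact hy (by rw [← hwh, hw1, hh1']; norm_num)
  simp only [solution, hyfalse, Bool.false_eq_true, if_false]
  have hinner : ∀ (acc : List Int), ∀ yw ∈ PySem.List.pyRange 1 (PySem.Int.floordiv yellow 2 + 1) 1,
      (List.foldl (fun (answer : List Int) (yh : Int) =>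
        if yw * yh == yellow then
          (if 4 + (yw + yh) * 2 == brown then PySem.List.sorted [yw + 2, yh + 2] (fun x => x) true
           else answer)
        else answer) acc (PySem.List.pyRange 1 (PySem.Int.floordiv yellow yw + 1) 1))
      = if (PySem.List.pyRange 1 (PySem.Int.floordiv yellow yw + 1) 1).any
            (fun yh => (yw * yh == yellow) && (4 + (yw + yh) * 2 == brown)) then [w + 2, h + 2]
        else acc := by
    intro acc yw hyw
    have h1yw : 1 ≤ yw := (PySem.List.mem_pyRange_one.mp hyw).1
    rw [PySem.List.foldl_congr_mem _ _
        (fun (acc2 : List Int) (yh : Int) =>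
          if (yw * yh == yellow) && (4 + (yw + yh) * 2 == brown) then [w + 2, h + 2] else acc2) acc
        (inner_body_eq ⟨hh1, hhw, hwh, hbr⟩ yw h1yw)]
    exact foldl_write_const _ _ _ acc
  rw [PySem.List.foldl_congr_mem _ _
      (fun (acc : List Int) (yw : Int) =>
        if (PySem.List.pyRange 1 (PySem.Int.floordiv yellow yw + 1) 1).any
            (fun yh => (yw * yh == yellow) && (4 + (yw + yh) * 2 == brown)) then [w + 2, h + 2]
        else acc) [] hinner]
  have hANY : (PySem.List.pyRange 1 (PySem.Int.floordiv yellow 2 + 1) 1).any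
      (fun yw => (PySem.List.pyRange 1 (PySem.Int.floordiv yellow yw + 1) 1).any
        (fun yh => (yw * yh == yellow) && (4 + (yw + yh) * 2 == brown))) = true := by
    rw [List.any_eq_true]
    refine ⟨h, ?_, ?_⟩
    · refine PySem.List.mem_pyRange_one.mpr ⟨hh1, ?_⟩
      have hmul : h * 2 ≤ yellow := by nlinarith
      have := (PySem.Int.le_floordiv_iff_mul_le (by norm_num : (0:Int) < 2)).mpr hmul
      omega
    · rw [List.any_eq_true]
      refine ⟨w, ?_, ?_⟩
      · refine PySem.List.mem_pyRange_one.mpr ⟨by omega, ?_⟩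
        have : PySem.Int.floordiv yellow h = w :=
          (PySem.Int.floordiv_eq_iff_of_pos (by omega)).mpr ⟨le_of_eq hwh, by nlinarith⟩
        omega
      · simp only [Bool.and_eq_true, beq_iff_eq]
        exact ⟨by rw [mul_comm]; exact hwh, by omega⟩
  rw [foldl_write_const, if_pos hANY]

theorem solution_eq_nil {brown yellow : Int} (hy : yellow ≠ 1)
    (hng : ∀ w h, ¬ good brown yellow w h) : solution brown yellow = [] := by
  have hyfalse : (yellow == 1) = false := by simpa using hy
  simp only [solution, hyfalse, Bool.false_eq_true, if_false]
  have hinner : ∀ (acc : List Int), ∀ yw ∈ PySem.List.pyRange 1 (PySem.Int.floordiv yellow 2 + 1) 1,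
      (List.foldl (fun (answer : List Int) (yh : Int) =>
        if yw * yh == yellow then
          (if 4 + (yw + yh) * 2 == brown then PySem.List.sorted [yw + 2, yh + 2] (fun x => x) true
           else answer)
        else answer) acc (PySem.List.pyRange 1 (PySem.Int.floordiv yellow yw + 1) 1))
      = acc := by
    intro acc yw hyw
    have h1yw : 1 ≤ yw := (PySem.List.mem_pyRange_one.mp hyw).1
    rw [PySem.List.foldl_congr_mem _ _ (fun (acc2 : List Int) (_ : Int) => acc2) acc
      (by
        intro acc2 yh hyh
        have h1yh : 1 ≤ yh := (PySem.List.mem_pyRange_one.mp hyh).1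
        by_cases c1 : (yw * yh == yellow) = true
        · by_cases c2 : (4 + (yw + yh) * 2 == brown) = true
          · exfalso
            have hprod : yw * yh = yellow := by simpa using c1
            have hsum : 4 + (yw + yh) * 2 = brown := by simpa using c2
            rcases (by omega : yh ≤ yw ∨ yw < yh) with hc | hc
            · exact hng yw yh ⟨h1yh, hc, hprod, by omega⟩
            · exact hng yh yw ⟨h1yw, le_of_lt hc, by rw [mul_comm]; exact hprod, by omega⟩
          · simp [c1, c2]
        · simp [c1])]
    exact foldl_id _ acc
  rw [PySem.List.foldl_congr_mem _ _ (fun (acc : List Int) (_ : Int) => acc) [] hinner]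
  exact foldl_id _ []

-- ---- binary search ----

theorem bsearchFuel_bounds : ∀ (fuel : Nat) (lo hi d : Int), (hi - lo).toNat ≤ fuel → lo ≤ hi →
    lo ≤ bsearchFuel fuel lo hi d ∧ bsearchFuel fuel lo hi d ≤ hi := by
  intro fuel
  induction fuel with
  | zero => intro lo hi d _ hle; simp [bsearchFuel]; omega
  | succ n ih =>
    intro lo hi d hfuel hle
    rw [bsearchFuel]
    by_cases hlt : lo < hi
    · rw [if_pos hlt]
      have hmid := PySem.Int.floordiv_two_mid_bounds (le_of_lt hlt)
      have hmlt : PySem.Int.floordiv (lo + hi) 2 < hi :=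
        (PySem.Int.floordiv_lt_iff_lt_mul (by norm_num)).mpr (by omega)
      by_cases hc : PySem.Int.floordiv (lo + hi) 2 * PySem.Int.floordiv (lo + hi) 2 < d
      · simp only [hc, if_true]
        have := ih (PySem.Int.floordiv (lo + hi) 2 + 1) hi d (by omega) (by omega)
        omega
      · simp only [hc, if_false]
        have := ih lo (PySem.Int.floordiv (lo + hi) 2) d (by omega) (by omega)
        omega
    · rw [if_neg hlt]; omega

theorem bsearchFuel_finds : ∀ (fuel : Nat) (lo hi x d : Int), (hi - lo).toNat ≤ fuel →
    0 ≤ lo → lo ≤ x → x ≤ hi → x * x = d → bsearchFuel fuel lo hi d = x := by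
  intro fuel
  induction fuel with
  | zero => intro lo hi x d hf h0 hlx hxh hx; simp [bsearchFuel]; omega
  | succ n ih =>
    intro lo hi x d hf h0 hlx hxh hx
    rw [bsearchFuel]
    by_cases hlt : lo < hi
    · rw [if_pos hlt]
      have hmid := PySem.Int.floordiv_two_mid_bounds (le_of_lt hlt)
      have hmlt : PySem.Int.floordiv (lo + hi) 2 < hi :=
        (PySem.Int.floordiv_lt_iff_lt_mul (by norm_num)).mpr (by omega)
      set mid := PySem.Int.floordiv (lo + hi) 2 with hm
      by_cases hc : mid * mid < d
      · simp only [hc, if_true]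
        have hmx : mid < x := by
          by_contra hmx
          have hxm : x ≤ mid := by omega
          have := mul_le_mul hxm hxm (by omega : (0:Int) ≤ x) (by omega : (0:Int) ≤ mid)
          linarith
        exact ih (mid + 1) hi x d (by omega) (by omega) (by omega) hxh hx
      · simp only [hc, if_false]
        have hxm : x ≤ mid := by
          by_contra hxm
          have hmx : mid < x := by omega
          have : mid * mid < x * x := by nlinarith
          linarith
        exact ih lo mid x d (by omega) h0 hlx hxm hx
    · rw [if_neg hlt]; omega

-- ---- characterization of B ----

theorem solution_alt_eq_of_good {brown yellow w h : Int}
    (g : good brown yellow w h) : solution_alt brown yellow = [w + 2, h + 2] := by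
  obtain ⟨hh1, hhw, hwh, hbr⟩ := g
  have hmod : PySem.Int.mod brown 2 = 0 := by
    rw [PySem.Int.mod_eq_emod_of_pos (by norm_num : (0:Int) < 2)]
    omega
  have hs : PySem.Int.floordiv (brown - 4) 2 = w + h :=
    (PySem.Int.floordiv_eq_iff_of_pos (by norm_num)).mpr ⟨by omega, by omega⟩
  have hd : (w + h) * (w + h) - 4 * yellow = (w - h) * (w - h) := by
    rw [← hwh]; ring
  have hr : bsearchFuel (w + h - 0).toNat 0 (w + h) ((w - h) * (w - h)) = w - h :=
    bsearchFuel_finds _ 0 (w + h) (w - h) _ (le_refl _) (le_refl 0) (by omega) (by omega) rfl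
  have hsr : PySem.Int.mod (w + h - (w - h)) 2 = 0 := by
    rw [PySem.Int.mod_eq_emod_of_pos (by norm_num : (0:Int) < 2)]
    omega
  have hfh : PySem.Int.floordiv (w + h - (w - h)) 2 = h :=
    (PySem.Int.floordiv_eq_iff_of_pos (by norm_num)).mpr ⟨by omega, by omega⟩
  have hfw : PySem.Int.floordiv (w + h + (w - h)) 2 = w :=
    (PySem.Int.floordiv_eq_iff_of_pos (by norm_num)).mpr ⟨by omega, by omega⟩
  have hdneg : ¬ ((w - h) * (w - h) < 0) := by nlinarith
  simp only [solution_alt, hmod, hs, hd, hr, hsr, hfh, hfw]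
  rw [if_neg (by simp), if_neg hdneg, if_neg (by simp), if_neg (by omega)]

theorem solution_alt_eq_nil {brown yellow : Int}
    (hng : ∀ w h, ¬ good brown yellow w h) : solution_alt brown yellow = [] := by
  simp only [solution_alt]
  split_ifs with h1 h2 h3 h4
  · rfl
  · rfl
  · rfl
  · rfl
  · exfalso
    push_neg at h1 h3
    obtain ⟨hr2, hm2⟩ := h3
    set s := PySem.Int.floordiv (brown - 4) 2 with hsdef
    set d := s * s - 4 * yellow with hddef
    set r := bsearchFuel (s - 0).toNat 0 s d with hrdef
    have hbrown : brown = 2 * s + 4 := by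
      have hdvd : (2 : Int) ∣ brown := (PySem.Int.mod_eq_zero_iff_dvd brown 2).mp h1
      obtain ⟨k, hk⟩ := hdvd
      have : PySem.Int.floordiv (brown - 4) 2 = k - 2 :=
        (PySem.Int.floordiv_eq_iff_of_pos (by norm_num)).mpr ⟨by omega, by omega⟩
      omega
    have hsr_dvd : (2 : Int) ∣ (s - r) := (PySem.Int.mod_eq_zero_iff_dvd _ 2).mp hm2
    obtain ⟨m, hm⟩ := hsr_dvd
    have hm1 : 1 ≤ m := by
      have : PySem.Int.floordiv (s - r) 2 = m :=
        (PySem.Int.floordiv_eq_iff_of_pos (by norm_num)).mpr ⟨by omega, by omega⟩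
      omega
    have hr_nonneg : 0 ≤ r := by
      by_cases hs0 : 0 ≤ s
      · exact (bsearchFuel_bounds _ 0 s d (le_refl _) hs0).1
      · have hz : (s - 0).toNat = 0 := by omega
        rw [hrdef, hz, bsearchFuel]
    have hs_eq : s = 2 * m + r := by omega
    have key : 4 * ((m + r) * m) = 4 * yellow := by
      have hrr : r * r = s * s - 4 * yellow := hr2
      linear_combination (-(s + 2 * m + r)) * hs_eq - hrr
    exact hng (m + r) m ⟨hm1, by omega, by linarith [key], by omega⟩

-- ===== VERDICT (by name: the statement is the Claim_ definition above) =====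
theorem solution_spec : Claim_unchanged_solution := by
  intro brown yellow _ hnD
  by_cases hy : yellow = 1
  · have hb : brown = 8 := by
      by_contra hb
      exact hnD ⟨hy, hb⟩
    subst hy hb
    have hB : solution_alt 8 1 = [1 + 2, 1 + 2] :=
      solution_alt_eq_of_good (brown := 8) (yellow := 1) (w := 1) (h := 1) (by unfold good; omega)
    rw [hB]; decide
  · by_cases hg : ∃ w h, good brown yellow w h
    · obtain ⟨w, h, g⟩ := hg
      rw [solution_eq_of_good hy g, solution_alt_eq_of_good g]
    · push_neg at hg
      rw [solution_eq_nil hy hg, solution_alt_eq_nil hg]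

theorem solution_changed : Claim_changed_solution := by
  unfold Claim_changed_solution; decide

theorem solution_tight : Claim_exact_solution := by
  intro brown yellow _ hD
  obtain ⟨hy, hb⟩ := hD
  subst hy
  have hA : solution brown 1 = [3, 3] := by simp [solution]
  have hB : solution_alt brown 1 = [] := by
    apply solution_alt_eq_nil
    intro w h g
    exact hb (good_one g).2.2
  rw [hA, hB]
  simp
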